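-- pv_equiv track=rewrite | github.com/belovmd/it-academy-python-spring | src/task_3.py | common_numbers
-- ===== SOURCE A (Python) =====
-- def common_numbers(lst1, lst2):
--     """Unique elements from each list common for two lists
--
--     :param lst1: list with integers numbers
--     :param lst2: list with integers numbers
--     :return: number of unique elements common for two lists
--     """
--     dict_count = {}
--     for nmb in lst1 + lst2:
--         dict_count[nmb] = dict_count.get(nmb, 0) + 1
--     counter = 0
--     common_elements = {*lst1} & {*lst2}
--     for key, value in dict_count.items():
--         counter += 1 if value == 2 and key in common_elements else 0
--     return counter
-- ===== SOURCE B (Python) =====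
-- def common_numbers(lst1, lst2):
--     """Unique elements from each list common for two lists
--
--     :param lst1: list with integers numbers
--     :param lst2: list with integers numbers
--     :return: number of unique elements common for two lists
--     """
--     c1 = {}
--     for n in lst1:
--         c1[n] = c1.get(n, 0) + 1
--     c2 = {}
--     for n in lst2:
--         c2[n] = c2.get(n, 0) + 1
--     return sum(1 for n in c1 if c1[n] == 1 and c2.get(n, 0) == 1)
-- ===== Notes on version B (the rewrite author's own statement) =====
-- stated objective: alternative
-- what changed: Replaces A's single combined-count dict over lst1+lst2 plus a separate set-intersection membership test with two per-list frequency dicts and the direct condition count-in-lst1 == 1 and count-in-lst2 == 1, summed over the first dict's keys.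
import Mathlib
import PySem

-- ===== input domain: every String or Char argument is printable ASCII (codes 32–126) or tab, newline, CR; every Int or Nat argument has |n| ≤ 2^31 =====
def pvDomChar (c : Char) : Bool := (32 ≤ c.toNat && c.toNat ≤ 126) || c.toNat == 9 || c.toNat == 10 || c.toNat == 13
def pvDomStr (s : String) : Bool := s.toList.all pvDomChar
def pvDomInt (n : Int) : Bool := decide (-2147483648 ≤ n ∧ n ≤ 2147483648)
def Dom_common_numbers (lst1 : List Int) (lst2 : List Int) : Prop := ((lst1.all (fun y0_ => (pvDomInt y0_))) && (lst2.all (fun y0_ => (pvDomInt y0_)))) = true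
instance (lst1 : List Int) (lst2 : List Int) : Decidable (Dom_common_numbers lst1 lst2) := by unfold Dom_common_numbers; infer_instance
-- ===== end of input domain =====

-- B replaces A's combined-count dict over lst1+lst2 and its set-intersection pass
-- with two per-list frequency dicts and the condition "count 1 in each list".

-- ===== PORT A =====
def common_numbers (lst1 : List Int) (lst2 : List Int) : Int :=
  let dict_count : PySem.Dict Int Int :=
    (lst1 ++ lst2).foldl (fun d nmb => d.insert nmb (d.getD nmb 0 + 1)) PySem.Dict.empty
  let common_elements : PySem.Set Int :=
    PySem.Set.inter (PySem.Set.ofList lst1) (PySem.Set.ofList lst2)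
  dict_count.items.foldl
    (fun counter p =>
      counter + if p.2 == 2 && PySem.Set.contains common_elements p.1 then 1 else 0) 0

-- ===== PORT B =====
def common_numbers_alt (lst1 : List Int) (lst2 : List Int) : Int :=
  let c1 : PySem.Dict Int Int :=
    lst1.foldl (fun d n => d.insert n (d.getD n 0 + 1)) PySem.Dict.empty
  let c2 : PySem.Dict Int Int :=
    lst2.foldl (fun d n => d.insert n (d.getD n 0 + 1)) PySem.Dict.empty
  c1.keys.foldl
    (fun acc n => acc + if c1.getD n 0 == 1 && c2.getD n 0 == 1 then 1 else 0) 0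

-- ===== PRECONDITION & SPEC =====
def Spec_common_numbers (lst1 : List Int) (lst2 : List Int) (out : Int) : Prop := out = common_numbers_alt lst1 lst2
instance (lst1 : List Int) (lst2 : List Int) (out : Int) : Decidable (Spec_common_numbers lst1 lst2 out) := by unfold Spec_common_numbers; infer_instance

-- ===== CLAIM (what is proved, stated in full; the proofs are below) =====
def Claim_equal_common_numbers : Prop := ∀ (lst1 : List Int) (lst2 : List Int), Dom_common_numbers lst1 lst2 → Spec_common_numbers lst1 lst2 (common_numbers lst1 lst2)

-- ===== LEMMAS AND PROOFS =====

-- a '+ if … then 1 else 0' fold is a countP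
lemma foldl_add_ite_one {α : Type} (l : List α) (p : α → Bool) (a : Int) :
    l.foldl (fun acc x => acc + if p x then (1 : Int) else 0) a = a + (l.countP p : Int) := by
  induction l generalizing a with
  | nil => simp
  | cons x t ih =>
      simp only [List.foldl_cons, List.countP_cons, ih]
      by_cases h : p x = true
      · simp [h]; ring
      · simp [h]

-- A's result as a countP over the deduped concatenation.
lemma common_numbers_eq_countP (lst1 lst2 : List Int) :
    common_numbers lst1 lst2 =
      ((PySem.Set.ofList (lst1 ++ lst2)).countP
        (fun k => (((lst1 ++ lst2).count k : Int) == 2) &&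
          PySem.Set.contains (PySem.Set.inter (PySem.Set.ofList lst1) (PySem.Set.ofList lst2)) k) : Int) := by
  unfold common_numbers
  dsimp only
  rw [PySem.Dict.foldl_insert_getD_add_one_eq_counter, PySem.Dict.items_counter,
    List.foldl_map, foldl_add_ite_one]
  simp

-- B's result as a countP over deduped lst1.
lemma common_numbers_alt_eq_countP (lst1 lst2 : List Int) :
    common_numbers_alt lst1 lst2 =
      ((PySem.Set.ofList lst1).countP
        (fun k => ((lst1.count k : Int) == 1) && ((lst2.count k : Int) == 1)) : Int) := by
  unfold common_numbers_alt
  dsimp only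
  rw [PySem.Dict.foldl_insert_getD_add_one_eq_counter,
    PySem.Dict.foldl_insert_getD_add_one_eq_counter, PySem.Dict.keys_counter,
    foldl_add_ite_one]
  simp [PySem.Dict.getD_counter]

-- the two predicates agree on every key, and pick out the same key set
lemma pred_iff (lst1 lst2 : List Int) (k : Int) :
    ((((lst1 ++ lst2).count k : Int) == 2) &&
        PySem.Set.contains (PySem.Set.inter (PySem.Set.ofList lst1) (PySem.Set.ofList lst2)) k) =
      (((lst1.count k : Int) == 1) && ((lst2.count k : Int) == 1)) := by
  have h1 : k ∈ lst1 ↔ 1 ≤ lst1.count k := by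
    constructor
    · exact fun h => List.one_le_count_iff.mpr h
    · exact fun h => List.one_le_count_iff.mp h
  have h2 : k ∈ lst2 ↔ 1 ≤ lst2.count k := by
    constructor
    · exact fun h => List.one_le_count_iff.mpr h
    · exact fun h => List.one_le_count_iff.mp h
  apply Bool.eq_iff_iff.mpr
  simp only [Bool.and_eq_true, beq_iff_eq, List.count_append, PySem.Set.contains_iff,
    PySem.Set.mem_inter, PySem.Set.mem_ofList]
  constructor
  · rintro ⟨hc, hm1, hm2⟩
    rw [h1] at hm1; rw [h2] at hm2
    push_cast at hc ⊢
    omega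
  · rintro ⟨hc1, hc2⟩
    refine ⟨by push_cast; omega, ?_, ?_⟩
    · rw [h1]; omega
    · rw [h2]; omega

-- ===== VERDICT (by name: the statement is the Claim_ definition above) =====
theorem common_numbers_spec : Claim_equal_common_numbers := by
  intro lst1 lst2 _
  show _ = _
  rw [common_numbers_eq_countP, common_numbers_alt_eq_countP]
  congr 1
  have hpred := pred_iff lst1 lst2
  set p := fun k => (((lst1.count k : Int) == 1) && ((lst2.count k : Int) == 1)) with hp
  rw [List.countP_congr (fun k _ => by rw [hpred k])]
  -- same predicate over two nodup lists with the same satisfying members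
  rw [List.countP_eq_length_filter, List.countP_eq_length_filter]
  apply List.Perm.length_eq
  rw [List.perm_ext_iff_of_nodup (List.Nodup.filter _ (PySem.Set.nodup_ofList _))
    (List.Nodup.filter _ (PySem.Set.nodup_ofList _))]
  intro a
  simp only [List.mem_filter, PySem.Set.mem_ofList, List.mem_append, hp]
  constructor
  · rintro ⟨_, h⟩
    refine ⟨?_, h⟩
    have := (Bool.and_eq_true _ _).mp h
    have h1 : lst1.count a = 1 := by
      have := beq_iff_eq.mp this.1; exact_mod_cast this
    exact List.one_le_count_iff.mp (by omega)
  · rintro ⟨hm, h⟩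
    exact ⟨Or.inl hm, h⟩
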